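-- pv_equiv track=rewrite | github.com/must108/lc-solutions | python/easy/longesttask.py | hardestWorker
-- ===== SOURCE A (Python) =====
-- from typing import List
--
-- def hardestWorker(n: int, logs: List[List[int]]) -> int:
--     n = len(logs)
--     h = {}
--
--     h[logs[0][1]] = logs[0][0]
--     for i in range(1, n):
--         t = logs[i][1]-logs[i-1][1]
--         if t not in h:
--             h[t] = logs[i][0]
--         else:
--             h[t] = logs[i][0] if h[t] > logs[i][0] else h[t]
--
--     return h[max(h)]
-- ===== SOURCE B (Python) =====
-- def hardestWorker(n, logs):
--     best = logs[0][0]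
--     max_t = logs[0][1]
--     prev = logs[0][1]
--     for row in logs[1:]:
--         t = row[1] - prev
--         prev = row[1]
--         if t > max_t or (t == max_t and row[0] < best):
--             max_t = t
--             best = row[0]
--     return best
-- ===== Notes on version B (the rewrite author's own statement) =====
-- stated objective: simpler
-- what changed: Replaces the time->min-id dictionary plus final max-key scan with a single running-max pass that keeps just two scalars (max task time and best worker id, ties broken by smaller id).
import Mathlib
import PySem

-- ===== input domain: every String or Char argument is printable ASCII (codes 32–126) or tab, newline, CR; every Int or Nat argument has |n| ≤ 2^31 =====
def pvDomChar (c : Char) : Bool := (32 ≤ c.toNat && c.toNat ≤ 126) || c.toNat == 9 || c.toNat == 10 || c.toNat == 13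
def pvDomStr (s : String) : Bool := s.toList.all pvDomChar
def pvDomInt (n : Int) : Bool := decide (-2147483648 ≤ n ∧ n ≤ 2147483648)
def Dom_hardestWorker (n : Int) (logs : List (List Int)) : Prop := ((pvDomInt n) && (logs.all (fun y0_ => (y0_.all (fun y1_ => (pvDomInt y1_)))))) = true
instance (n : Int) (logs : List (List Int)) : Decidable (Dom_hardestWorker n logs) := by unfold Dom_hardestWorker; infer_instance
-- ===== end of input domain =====

-- B replaces A's time->min-id dictionary and final max-key scan by one running-max pass
-- keeping two scalars (objective: simpler, O(1) extra space).

-- ===== PORT A =====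
-- one loop step of A's dict-building loop (body of 'for i in range(1, n)')
def hwStep (logs : List (List Int)) (h : PySem.Dict Int Int) (i : Int) : PySem.Dict Int Int :=
  let t := PySem.List.pyGetD (PySem.List.pyGetD logs i []) 1 0
           - PySem.List.pyGetD (PySem.List.pyGetD logs (i - 1) []) 1 0
  if h.contains t = false then
    h.insert t (PySem.List.pyGetD (PySem.List.pyGetD logs i []) 0 0)
  else
    h.insert t (if h.getD t 0 > PySem.List.pyGetD (PySem.List.pyGetD logs i []) 0 0
                then PySem.List.pyGetD (PySem.List.pyGetD logs i []) 0 0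
                else h.getD t 0)

def hardestWorker (n : Int) (logs : List (List Int)) : Int :=
  let n : Int := (logs.length : Int)
  let row0 := PySem.List.pyGetD logs 0 []
  let h : PySem.Dict Int Int :=
    PySem.Dict.empty.insert (PySem.List.pyGetD row0 1 0) (PySem.List.pyGetD row0 0 0)
  let h := (PySem.List.pyRange 1 n 1).foldl (hwStep logs) h
  match PySem.List.max? h.keys (fun x => x) with   -- max(h) iterates the keys; none = ValueError (unreachable: h nonempty)
  | some m => h.getD m 0
  | none => 0

-- ===== PORT B =====
-- loop body of B; state = (prev, max_t, best)
def hwAltStep (st : Int × Int × Int) (row : List Int) : Int × Int × Int :=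
  let t := PySem.List.pyGetD row 1 0 - st.1
  let prev := PySem.List.pyGetD row 1 0
  if t > st.2.1 ∨ (t = st.2.1 ∧ PySem.List.pyGetD row 0 0 < st.2.2) then
    (prev, t, PySem.List.pyGetD row 0 0)
  else
    (prev, st.2.1, st.2.2)

def hardestWorker_alt (n : Int) (logs : List (List Int)) : Int :=
  let row0 := PySem.List.pyGetD logs 0 []
  let st := (PySem.List.slice logs (some 1) none).foldl hwAltStep
    (PySem.List.pyGetD row0 1 0, PySem.List.pyGetD row0 1 0, PySem.List.pyGetD row0 0 0)
  st.2.2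

-- ===== PRECONDITION & SPEC =====
-- Pre_ excludes exactly the inputs where Python A raises IndexError: empty logs (logs[0])
-- or a row with fewer than two entries.
def Pre_hardestWorker (n : Int) (logs : List (List Int)) : Prop :=
  logs ≠ [] ∧ ∀ row ∈ logs, 2 ≤ row.length
instance (n : Int) (logs : List (List Int)) : Decidable (Pre_hardestWorker n logs) := by
  unfold Pre_hardestWorker; infer_instance
def pvWitness_hardestWorker : Int × List (List Int) := (2, [[1, 3], [2, 7]])

def Spec_hardestWorker (n : Int) (logs : List (List Int)) (out : Int) : Prop := out = hardestWorker_alt n logs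
instance (n : Int) (logs : List (List Int)) (out : Int) : Decidable (Spec_hardestWorker n logs out) := by unfold Spec_hardestWorker; infer_instance

-- ===== CLAIM (what is proved, stated in full; the proofs are below) =====
def Claim_equal_hardestWorker : Prop := ∀ (n : Int) (logs : List (List Int)), Dom_hardestWorker n logs → Pre_hardestWorker n logs → Spec_hardestWorker n logs (hardestWorker n logs)

-- ===== LEMMAS AND PROOFS =====

-- A's index loop over range(1, n) rewritten as a structural fold carrying the previous row.
def adjFold (logs : List (List Int)) : List Int → PySem.Dict Int Int → List (List Int) → PySem.Dict Int Int
  | _, h, [] => h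
  | prevRow, h, r :: rest =>
      adjFold logs r
        (let t := PySem.List.pyGetD r 1 0 - PySem.List.pyGetD prevRow 1 0
         if h.contains t = false then h.insert t (PySem.List.pyGetD r 0 0)
         else h.insert t (if h.getD t 0 > PySem.List.pyGetD r 0 0
                          then PySem.List.pyGetD r 0 0 else h.getD t 0))
        rest

lemma foldl_hwStep_eq_adjFold (logs : List (List Int)) :
    ∀ (m k : Nat) (h : PySem.Dict Int Int), m = logs.length - (k + 1) → k < logs.length →
      (PySem.List.pyRange ((k : Int) + 1) (logs.length : Int) 1).foldl (hwStep logs) h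
        = adjFold logs (logs.getD k []) h (logs.drop (k + 1)) := by
  intro m
  induction m with
  | zero =>
      intro k h hm hk
      have hlen : logs.length = k + 1 := by omega
      rw [PySem.List.pyRange_one_eq_nil (by omega), List.drop_eq_nil_of_le (by omega)]
      rfl
  | succ m ih =>
      intro k h hm hk
      have hk1 : k + 1 < logs.length := by omega
      rw [PySem.List.pyRange_one_cons (by exact_mod_cast by omega : ((k : Int) + 1) < (logs.length : Int))]
      rw [List.foldl_cons]
      have hdrop : logs.drop (k + 1) = logs[k + 1] :: logs.drop (k + 2) :=
        List.drop_eq_getElem_cons hk1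
      rw [hdrop]
      show (PySem.List.pyRange ((k : Int) + 1 + 1) (logs.length : Int) 1).foldl (hwStep logs)
            (hwStep logs h ((k : Int) + 1)) = _
      have hstep : hwStep logs h ((k : Int) + 1)
          = (let t := PySem.List.pyGetD logs[k + 1] 1 0 - PySem.List.pyGetD (logs.getD k []) 1 0
             if h.contains t = false then h.insert t (PySem.List.pyGetD logs[k + 1] 0 0)
             else h.insert t (if h.getD t 0 > PySem.List.pyGetD logs[k + 1] 0 0
                              then PySem.List.pyGetD logs[k + 1] 0 0 else h.getD t 0)) := by
        unfold hwStep
        have e1 : ((k : Int) + 1 - 1) = (k : Int) := by ring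
        have e2 : ((k : Int) + 1) = ((k + 1 : Nat) : Int) := by push_cast; ring
        rw [e1, e2, PySem.List.pyGetD_natCast, PySem.List.pyGetD_natCast,
            List.getD_eq_getElem _ _ hk1]
      rw [hstep]
      have e3 : ((k : Int) + 1) = ((k + 1 : Nat) : Int) := by push_cast; ring
      rw [e3, ih (k + 1) _ (by omega) hk1, List.getD_eq_getElem _ _ hk1]
      rfl

-- the running-max invariant: the fold of B tracks (membership of max key, key bound, value at max key)
lemma adjFold_inv (logs : List (List Int)) :
    ∀ (rest : List (List Int)) (prevRow : List Int) (h : PySem.Dict Int Int) (maxT best : Int),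
      maxT ∈ h.keys → (∀ k ∈ h.keys, k ≤ maxT) → h.getD maxT 0 = best →
      (let st := rest.foldl hwAltStep (PySem.List.pyGetD prevRow 1 0, maxT, best)
       let h' := adjFold logs prevRow h rest
       st.2.1 ∈ h'.keys ∧ (∀ k ∈ h'.keys, k ≤ st.2.1) ∧ h'.getD st.2.1 0 = st.2.2) := by
  intro rest
  induction rest with
  | nil => intro prevRow h maxT best h1 h2 h3; exact ⟨h1, h2, h3⟩
  | cons r rest ih =>
      intro prevRow h maxT best h1 h2 h3
      simp only [List.foldl_cons, adjFold]
      set t := PySem.List.pyGetD r 1 0 - PySem.List.pyGetD prevRow 1 0 with ht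
      set wid := PySem.List.pyGetD r 0 0 with hwid
      rcases lt_trichotomy maxT t with hlt | heq | hgt
      · -- new maximum: t not a key of h
        have hnc : h.contains t = false := by
          by_contra hc
          have : t ∈ h.keys := (PySem.Dict.contains_iff_mem_keys h t).1 (by
            cases hb : h.contains t with
            | false => exact absurd hb hc
            | true => rfl)
          exact absurd (h2 t this) (by omega)
        have hstep : hwAltStep (PySem.List.pyGetD prevRow 1 0, maxT, best) r
            = (PySem.List.pyGetD r 1 0, t, wid) := by
          simp only [hwAltStep]
          rw [if_pos]
          left; exact hlt
        rw [hstep, hnc]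
        simp only [if_true]
        refine ih r _ t wid ?_ ?_ ?_
        · exact (PySem.Dict.mem_keys_insert h t t wid).2 (Or.inl rfl)
        · intro k hk
          rcases (PySem.Dict.mem_keys_insert h t k wid).1 hk with hk | hk
          · omega
          · have := h2 k hk; omega
        · exact PySem.Dict.getD_insert_self h t wid 0
      · -- equal maximum: tie-break by min id
        rw [heq] at h1 h2 h3 ⊢
        have hc : h.contains t = true := (PySem.Dict.contains_iff_mem_keys h t).2 h1
        have hstep : hwAltStep (PySem.List.pyGetD prevRow 1 0, t, best) r
            = (PySem.List.pyGetD r 1 0, t, if best > wid then wid else best) := by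
          simp only [hwAltStep]
          by_cases hb : wid < best
          · rw [if_pos (Or.inr ⟨rfl, hb⟩)]
            simp only [if_pos (show best > wid from hb)]
            rfl
          · rw [if_neg (by
              rintro (hgt | ⟨-, hw⟩)
              · omega
              · exact hb hw)]
            simp [if_neg (show ¬ best > wid by omega)]
        rw [hstep, hc]
        simp only [Bool.true_eq_false, if_false]
        rw [h3]
        refine ih r _ t _ ?_ ?_ ?_
        · exact (PySem.Dict.mem_keys_insert h t t _).2 (Or.inl rfl)
        · intro k hk
          rcases (PySem.Dict.mem_keys_insert h t k _).1 hk with hk | hk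
          · omega
          · exact h2 k hk
        · exact PySem.Dict.getD_insert_self h t _ 0
      · -- smaller t: B's state unchanged, A updates a key below the maximum
        have hstep : hwAltStep (PySem.List.pyGetD prevRow 1 0, maxT, best) r
            = (PySem.List.pyGetD r 1 0, maxT, best) := by
          simp only [hwAltStep]
          rw [if_neg (by rintro (hx | ⟨hx, -⟩) <;> omega)]
        rw [hstep]
        have hne : maxT ≠ t := by omega
        cases hcc : h.contains t with
        | false =>
            simp only [if_true]
            refine ih r _ maxT best ?_ ?_ ?_
            · exact (PySem.Dict.mem_keys_insert h t maxT wid).2 (Or.inr h1)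
            · intro k hk
              rcases (PySem.Dict.mem_keys_insert h t k wid).1 hk with hk | hk
              · omega
              · exact h2 k hk
            · rw [PySem.Dict.getD_insert_of_ne h wid 0 hne]; exact h3
        | true =>
            simp only [Bool.true_eq_false, if_false]
            refine ih r _ maxT best ?_ ?_ ?_
            · exact (PySem.Dict.mem_keys_insert h t maxT _).2 (Or.inr h1)
            · intro k hk
              rcases (PySem.Dict.mem_keys_insert h t k _).1 hk with hk | hk
              · have : t ∈ h.keys := (PySem.Dict.contains_iff_mem_keys h t).1 hcc
                have := h2 t this; omega
              · exact h2 k hk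
            · rw [PySem.Dict.getD_insert_of_ne h _ 0 hne]; exact h3

-- ===== VERDICT (by name: the statement is the Claim_ definition above) =====
theorem hardestWorker_spec : Claim_equal_hardestWorker := by
  intro n logs _ hpre
  obtain ⟨hne, -⟩ := hpre
  unfold Spec_hardestWorker hardestWorker hardestWorker_alt
  obtain ⟨r, rest, rfl⟩ := List.exists_cons_of_ne_nil hne
  simp only [PySem.List.slice_from_one, List.tail_cons]
  have hrow0 : PySem.List.pyGetD (r :: rest) 0 [] = r := by
    simpa using PySem.List.pyGetD_zero_cons (x := r) (xs := rest) (d := ([] : List Int))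
  rw [hrow0]
  set h0 : PySem.Dict Int Int :=
    PySem.Dict.empty.insert (PySem.List.pyGetD r 1 0) (PySem.List.pyGetD r 0 0) with hh0
  have hconv : (PySem.List.pyRange 1 ((r :: rest).length : Int) 1).foldl (hwStep (r :: rest)) h0
      = adjFold (r :: rest) r h0 rest := by
    have := foldl_hwStep_eq_adjFold (r :: rest) ((r :: rest).length - 1) 0 h0 (by omega) (by simp)
    simpa using this
  rw [hconv]
  have hkeys : h0.keys = [PySem.List.pyGetD r 1 0] := by
    rw [hh0, PySem.Dict.keys_insert_of_not_contains PySem.Dict.empty _ (PySem.Dict.contains_empty _)]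
    simp [PySem.Dict.keys_empty]
  have hinv := adjFold_inv (r :: rest) rest r h0 (PySem.List.pyGetD r 1 0) (PySem.List.pyGetD r 0 0)
    (by rw [hkeys]; simp)
    (by intro k hk; rw [hkeys] at hk; simp at hk; omega)
    (by rw [hh0]; exact PySem.Dict.getD_insert_self _ _ _ 0)
  simp only at hinv
  obtain ⟨hmem, hbound, hval⟩ := hinv
  set st := rest.foldl hwAltStep (PySem.List.pyGetD r 1 0, PySem.List.pyGetD r 1 0, PySem.List.pyGetD r 0 0)
  set h' := adjFold (r :: rest) r h0 rest
  cases hmax : PySem.List.max? h'.keys (fun x => x) with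
  | none =>
      exfalso
      have : h'.keys = [] := (PySem.List.max?_eq_none_iff _ _).1 hmax
      rw [this] at hmem; simp at hmem
  | some m =>
      have hm1 : m ∈ h'.keys := PySem.List.max?_mem hmax
      have hm2 : st.2.1 ≤ m := PySem.List.max?_isMax hmax _ hmem
      have hm3 : m ≤ st.2.1 := hbound m hm1
      have hmeq : m = st.2.1 := le_antisymm hm3 hm2
      rw [hmeq]
      exact hval
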